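-- pv_equiv track=rewrite | github.com/BarberWEI/handDoneAI | BotPlayer.py | most_dangerous_opponent_proximity
-- ===== SOURCE A (Python) =====
-- def most_dangerous_opponent_proximity(other_scores, winning_score):
--     if len(other_scores) == 0:
--         return 1
--     min_difference = winning_score - other_scores[0]
--     for score in other_scores:
--         if winning_score - score < min_difference:
--             min_difference = winning_score - score
--     return min_difference
-- ===== SOURCE B (Python) =====
-- def most_dangerous_opponent_proximity(other_scores, winning_score):
--     if not other_scores:
--         return 1
--     return winning_score - sorted(other_scores, reverse=True)[0]
-- ===== Notes on version B (the rewrite author's own statement) =====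
-- stated objective: alternative
-- what changed: Replaces A's single-pass running-minimum-of-differences loop with sort-then-pick: sort the opponent scores descending and subtract the first (largest) one, using min_s(w-s) = w - max_s(s).
import Mathlib
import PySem

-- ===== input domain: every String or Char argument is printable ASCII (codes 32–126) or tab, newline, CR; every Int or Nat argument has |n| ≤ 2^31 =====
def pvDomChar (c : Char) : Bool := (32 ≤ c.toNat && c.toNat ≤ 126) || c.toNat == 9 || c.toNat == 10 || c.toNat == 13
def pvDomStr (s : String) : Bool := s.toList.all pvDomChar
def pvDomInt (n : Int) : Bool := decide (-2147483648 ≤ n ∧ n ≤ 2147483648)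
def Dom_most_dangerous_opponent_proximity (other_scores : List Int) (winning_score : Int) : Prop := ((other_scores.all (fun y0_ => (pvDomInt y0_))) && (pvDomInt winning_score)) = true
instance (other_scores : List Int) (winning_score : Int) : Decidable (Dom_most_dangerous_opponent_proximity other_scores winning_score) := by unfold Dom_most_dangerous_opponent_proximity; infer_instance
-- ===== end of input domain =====

-- B sorts the opponent scores descending and subtracts the first one (sort-then-pick instead of a running-minimum loop).

-- ===== PORT A =====
def most_dangerous_opponent_proximity (other_scores : List Int) (winning_score : Int) : Int :=
  match other_scores with
  | [] => 1
  | first :: _ =>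
    other_scores.foldl
      (fun min_difference score =>
        if winning_score - score < min_difference then winning_score - score
        else min_difference)
      (winning_score - first)

-- ===== PORT B =====
def most_dangerous_opponent_proximity_alt (other_scores : List Int) (winning_score : Int) : Int :=
  match PySem.List.sorted other_scores (fun x => x) true with
  | [] => 1
  | m :: _ => winning_score - m

-- ===== PRECONDITION & SPEC =====
def Spec_most_dangerous_opponent_proximity (other_scores : List Int) (winning_score : Int) (out : Int) : Prop := out = most_dangerous_opponent_proximity_alt other_scores winning_score
instance (other_scores : List Int) (winning_score : Int) (out : Int) : Decidable (Spec_most_dangerous_opponent_proximity other_scores winning_score out) := by unfold Spec_most_dangerous_opponent_proximity; infer_instance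

-- ===== CLAIM =====
def Claim_equal_most_dangerous_opponent_proximity : Prop := ∀ (other_scores : List Int) (winning_score : Int), Dom_most_dangerous_opponent_proximity other_scores winning_score → Spec_most_dangerous_opponent_proximity other_scores winning_score (most_dangerous_opponent_proximity other_scores winning_score)

-- ===== LEMMAS AND PROOFS =====
-- A's fold over differences equals w minus the running-maximum fold.
theorem pv_fold_sub (w : Int) (t : List Int) : ∀ acc : Int,
    t.foldl (fun m s => if w - s < m then w - s else m) (w - acc)
      = w - t.foldl (fun a b => if a < b then b else a) acc := by
  induction t with
  | nil => intro acc; rfl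
  | cons b t ih =>
    intro acc
    simp only [List.foldl]
    by_cases h : acc < b
    · have h2 : w - b < w - acc := by omega
      rw [if_pos h2, if_pos h, ih]
    · have h2 : ¬ (w - b < w - acc) := by omega
      rw [if_neg h2, if_neg h, ih]

theorem pv_foldmax_mem (t : List Int) : ∀ acc : Int,
    t.foldl (fun a b => if a < b then b else a) acc = acc ∨
    t.foldl (fun a b => if a < b then b else a) acc ∈ t := by
  induction t with
  | nil => intro acc; exact Or.inl rfl
  | cons b t ih =>
    intro acc
    simp only [List.foldl]
    by_cases h : acc < b
    · rw [if_pos h]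
      rcases ih b with h1 | h1
      · exact Or.inr (by simp [h1])
      · exact Or.inr (List.mem_cons_of_mem _ h1)
    · rw [if_neg h]
      rcases ih acc with h1 | h1
      · exact Or.inl h1
      · exact Or.inr (List.mem_cons_of_mem _ h1)

theorem pv_foldmax_ge (t : List Int) : ∀ acc : Int,
    acc ≤ t.foldl (fun a b => if a < b then b else a) acc ∧
    ∀ x ∈ t, x ≤ t.foldl (fun a b => if a < b then b else a) acc := by
  induction t with
  | nil => intro acc; exact ⟨le_refl _, by simp⟩
  | cons b t ih =>
    intro acc
    simp only [List.foldl]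
    by_cases h : acc < b
    · rw [if_pos h]
      obtain ⟨h1, h2⟩ := ih b
      exact ⟨by omega, by intro x hx; rcases List.mem_cons.mp hx with rfl | hx; exact h1; exact h2 x hx⟩
    · rw [if_neg h]
      obtain ⟨h1, h2⟩ := ih acc
      exact ⟨h1, by intro x hx; rcases List.mem_cons.mp hx with rfl | hx; omega; exact h2 x hx⟩

-- ===== VERDICT =====
theorem most_dangerous_opponent_proximity_spec : Claim_equal_most_dangerous_opponent_proximity := by
  intro other_scores winning_score _
  unfold Spec_most_dangerous_opponent_proximity most_dangerous_opponent_proximity most_dangerous_opponent_proximity_alt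
  cases hxs : other_scores with
  | nil => rfl
  | cons h t =>
    cases hs : PySem.List.sorted (h :: t) (fun x => x) true with
    | nil => exact absurd hs (by simp [PySem.List.sorted_eq_nil_iff])
    | cons m t' =>
      simp only [List.foldl]
      have hstep : (if winning_score - h < winning_score - h then winning_score - h
          else winning_score - h) = winning_score - h := by omega
      rw [hstep, pv_fold_sub]
      -- the fold-max equals m, the head of the descending sort
      have hmax := PySem.List.key_head_sorted_rev_ge (xs := h :: t) (key := fun x => x) hs
      have hmem : m ∈ h :: t := by
        have := PySem.List.sorted_perm (h :: t) (fun x => x) true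
        rw [hs] at this
        exact this.mem_iff.mp (List.mem_cons_self)
      obtain ⟨h1, h2⟩ := pv_foldmax_ge t h
      have hF : t.foldl (fun a b => if a < b then b else a) h ∈ h :: t := by
        rcases pv_foldmax_mem t h with he | he
        · rw [he]; exact List.mem_cons_self
        · exact List.mem_cons_of_mem _ he
      have hle : t.foldl (fun a b => if a < b then b else a) h ≤ m := hmax _ hF
      have hge : m ≤ t.foldl (fun a b => if a < b then b else a) h := by
        rcases List.mem_cons.mp hmem with rfl | hm
        · exact h1
        · exact h2 _ hm
      omega
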